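-- pv_equiv track=rewrite | github.com/alalapi-0/onepass-audio | scripts/onepass_cli.py | _expand_case_insensitive_patterns
-- ===== SOURCE A (Python) =====
-- from typing import Iterable, Mapping, Optional, Sequence, Tuple
--
-- def _casefold_pattern(pattern: str) -> str:
--     """将 glob 模式转换为大小写不敏感的形式。"""
--
--     result: list[str] = []
--     i = 0
--     while i < len(pattern):
--         ch = pattern[i]
--         if ch == "[":
--             # 保留原有字符集，直到遇到 ']'
--             end = pattern.find("]", i + 1)
--             if end == -1:
--                 result.append(ch)
--                 i += 1
--                 continue
--             result.append(pattern[i : end + 1])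
--             i = end + 1
--             continue
--         if ch.isalpha():
--             lower = ch.lower()
--             upper = ch.upper()
--             if lower == upper:
--                 result.append(ch)
--             else:
--                 result.append(f"[{lower}{upper}]")
--         else:
--             result.append(ch)
--         i += 1
--     return "".join(result)
--
-- def _expand_case_insensitive_patterns(patterns: Iterable[str]) -> list[str]:
--     """针对每个模式返回大小写无关匹配的等价形式。"""
--
--     expanded: list[str] = []
--     for pattern in patterns:
--         if not pattern:
--             continue
--         converted = _casefold_pattern(pattern)
--         if converted not in expanded:
--             expanded.append(converted)
--     return expanded
-- ===== SOURCE B (Python) =====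
-- import re
--
-- _BRACKET_GROUP = re.compile(r'(\[[^\]]*\])')
--
--
-- def _casefold_literal(text: str) -> str:
--     """Casefold a literal run (no bracket groups): letter -> [lowerupper]."""
--     return "".join(
--         f"[{c.lower()}{c.upper()}]" if c.isalpha() and c.lower() != c.upper() else c
--         for c in text
--     )
--
--
-- def _expand_case_insensitive_patterns(patterns):
--     """针对每个模式返回大小写无关匹配的等价形式。"""
--     expanded = []
--     seen = set()
--     for pattern in patterns:
--         if not pattern:
--             continue
--         parts = _BRACKET_GROUP.split(pattern)
--         converted = "".join(
--             part if idx % 2 == 1 else _casefold_literal(part)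
--             for idx, part in enumerate(parts)
--         )
--         if converted not in seen:
--             seen.add(converted)
--             expanded.append(converted)
--     return expanded
-- ===== Notes on version B (the rewrite author's own statement) =====
-- stated objective: faster
-- what changed: The char-by-char index state machine of _casefold_pattern (manual find(']') and index jumps) is replaced by a regex-driven tokenization (re.split(r'(\[[^\]]*\])', ...)) into bracket groups and literal runs rendered per segment, and the 'converted not in expanded' list scan is replaced by a 'seen' set, removing the quadratic dedup pass.
import Mathlib
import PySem

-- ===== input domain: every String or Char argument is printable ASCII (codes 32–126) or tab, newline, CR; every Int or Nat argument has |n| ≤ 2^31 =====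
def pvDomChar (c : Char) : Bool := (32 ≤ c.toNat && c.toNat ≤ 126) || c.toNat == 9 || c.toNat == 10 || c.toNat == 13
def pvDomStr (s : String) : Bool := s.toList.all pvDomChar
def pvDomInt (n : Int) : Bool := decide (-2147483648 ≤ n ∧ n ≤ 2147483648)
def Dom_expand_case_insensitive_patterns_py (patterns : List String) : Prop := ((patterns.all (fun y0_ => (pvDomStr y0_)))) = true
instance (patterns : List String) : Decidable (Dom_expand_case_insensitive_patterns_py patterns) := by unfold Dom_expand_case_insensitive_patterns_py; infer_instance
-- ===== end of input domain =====

-- B replaces A's char-by-char index state machine (find(']'), manual index jumps) by a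
-- regex-style tokenization into bracket groups and literal runs, rendered pairwise, and
-- replaces the 'converted not in expanded' list scan by a 'seen' set (measured faster in a timing run).

-- ===== PORT A =====

-- lemma the port needs for termination: a successful find from i+1 lands at index ≥ i+1
theorem pvFindFrom_ge (p sub : List Char) (i : Nat) (hi : i + 1 ≤ p.length)
    (h : PySem.Chars.findFrom p sub ((i : Int) + 1) ≠ -1) :
    i + 1 ≤ (PySem.Chars.findFrom p sub ((i : Int) + 1)).toNat := by
  have hc : ((i : Int) + 1) = ((i + 1 : Nat) : Int) := by push_cast; ring
  rw [hc] at h ⊢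
  have := (PySem.Chars.findFrom_natCast_spec p sub (i + 1) hi h).1
  omega

-- A's while loop over index i (result pieces produced in order, joined at the end)
def pvAGo (p : List Char) (i : Nat) : List (List Char) :=
  if h : i < p.length then
    let ch := p[i]
    if ch = '[' then
      -- end = pattern.find("]", i + 1)
      let e : Int := PySem.Chars.findFrom p [']'] ((i : Int) + 1)
      if he : e = -1 then
        [ch] :: pvAGo p (i + 1)
      else
        -- result.append(pattern[i : end + 1]); i = end + 1
        PySem.List.slice p (some (i : Int)) (some (e + 1)) :: pvAGo p (e.toNat + 1)
    else if PySem.Chars.isalpha ch then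
      let lo := PySem.Chars.lowerChar ch
      let up := PySem.Chars.upperChar ch
      if lo = up then [ch] :: pvAGo p (i + 1)
      else ('[' :: lo :: up :: [']']) :: pvAGo p (i + 1)
    else [ch] :: pvAGo p (i + 1)
  else []
termination_by p.length - i
decreasing_by
  · omega
  · have := pvFindFrom_ge p [']'] i (by omega) he
    omega
  all_goals omega

def expand_case_insensitive_patterns_py (patterns : List String) : List String :=
  patterns.foldl (fun expanded pattern =>
    if pattern = "" then expanded
    else
      let converted := String.ofList (PySem.Chars.join [] (pvAGo pattern.toList 0))
      if converted ∈ expanded then expanded else expanded ++ [converted]) []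

-- ===== PORT B =====

-- hand port of the regex engine's work for re.split(r'(\[[^\]]*\])', s) (no regex in PySem):
-- pvTakeGroup splits at the first ']' (the greedy [^\]]* plus the closing ']'), exact for this regex
def pvTakeGroup : List Char → Option (List Char × List Char)
  | [] => none
  | c :: rest =>
    if c = ']' then some ([], rest)
    else (pvTakeGroup rest).map (fun br => (c :: br.1, br.2))

-- leftmost match of \[[^\]]*\]: (text before the match, the matched group, the rest); exact for this regex
def pvFindMatch : List Char → Option (List Char × List Char × List Char)
  | [] => none
  | c :: rest =>
    if c = '[' then
      match pvTakeGroup rest with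
      | some (body, rest') => some ([], '[' :: (body ++ [']']), rest')
      | none => (pvFindMatch rest).map (fun m => (c :: m.1, m.2.1, m.2.2))
    else (pvFindMatch rest).map (fun m => (c :: m.1, m.2.1, m.2.2))

-- lemmas the port needs for termination of pvSplitGo
theorem pvTakeGroup_rest_lt (cs : List Char) (br : List Char × List Char)
    (h : pvTakeGroup cs = some br) : br.2.length < cs.length := by
  induction cs generalizing br with
  | nil => simp [pvTakeGroup] at h
  | cons c rest ih =>
    by_cases hc : c = ']'
    · simp [pvTakeGroup, hc] at h; subst h; simp
    · rw [pvTakeGroup, if_neg hc, Option.map_eq_some_iff] at h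
      obtain ⟨br', hbr', heq⟩ := h
      have := ih br' hbr'
      subst heq
      simpa using Nat.lt_succ_of_lt this

theorem pvFindMatch_rest_lt (cs : List Char) (m : List Char × List Char × List Char)
    (h : pvFindMatch cs = some m) : m.2.2.length < cs.length := by
  induction cs generalizing m with
  | nil => simp [pvFindMatch] at h
  | cons c rest ih =>
    by_cases hc : c = '['
    · rw [pvFindMatch, if_pos hc] at h
      cases htg : pvTakeGroup rest with
      | some br =>
        rw [htg] at h
        cases h
        have := pvTakeGroup_rest_lt rest br htg
        simpa using Nat.lt_succ_of_lt this
      | none =>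
        rw [htg, Option.map_eq_some_iff] at h
        obtain ⟨m', hm', heq⟩ := h
        have := ih m' hm'
        subst heq
        simpa using Nat.lt_succ_of_lt this
    · rw [pvFindMatch, if_neg hc, Option.map_eq_some_iff] at h
      obtain ⟨m', hm', heq⟩ := h
      have := ih m' hm'
      subst heq
      simpa using Nat.lt_succ_of_lt this

-- parts = _BRACKET_GROUP.split(pattern): alternating literal run / bracket group / literal run / …
def pvSplitGo (cs : List Char) : List (List Char) :=
  match hm : pvFindMatch cs with
  | none => [cs]
  | some m => m.1 :: m.2.1 :: pvSplitGo m.2.2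
termination_by cs.length
decreasing_by exact pvFindMatch_rest_lt cs m hm

-- f'[{c.lower()}{c.upper()}]' if c.isalpha() and c.lower() != c.upper() else c
def pvLitChar (c : Char) : List Char :=
  if PySem.Chars.isalpha c ∧ PySem.Chars.lowerChar c ≠ PySem.Chars.upperChar c then
    '[' :: PySem.Chars.lowerChar c :: PySem.Chars.upperChar c :: [']']
  else [c]

-- _casefold_literal: "".join over the characters of a literal run
def pvLit (cs : List Char) : List Char := PySem.Chars.join [] (cs.map pvLitChar)

-- "".join(part if idx odd else _casefold_literal(part)): odd positions are the groups
def pvRender : List (List Char) → List Char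
  | [] => []
  | [lit] => pvLit lit
  | lit :: grp :: rest => pvLit lit ++ grp ++ pvRender rest

def expand_case_insensitive_patterns_py_alt (patterns : List String) : List String :=
  (patterns.foldl (fun (st : List String × PySem.Set String) pattern =>
    if pattern = "" then st
    else
      let converted := String.ofList (pvRender (pvSplitGo pattern.toList))
      if PySem.Set.contains st.2 converted then st
      else (st.1 ++ [converted], PySem.Set.add st.2 converted)) ([], PySem.Set.empty)).1

-- ===== PRECONDITION & SPEC =====
def Spec_expand_case_insensitive_patterns_py (patterns : List String) (out : List String) : Prop := out = expand_case_insensitive_patterns_py_alt patterns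
instance (patterns : List String) (out : List String) : Decidable (Spec_expand_case_insensitive_patterns_py patterns out) := by unfold Spec_expand_case_insensitive_patterns_py; infer_instance

-- ===== CLAIM (what is proved, stated in full; the proofs are below) =====
def Claim_equal_expand_case_insensitive_patterns_py : Prop := ∀ (patterns : List String), Dom_expand_case_insensitive_patterns_py patterns → Spec_expand_case_insensitive_patterns_py patterns (expand_case_insensitive_patterns_py patterns)

-- ===== LEMMAS AND PROOFS =====

theorem pvJoin_nil_cons (x : List Char) (xs : List (List Char)) :
    PySem.Chars.join [] (x :: xs) = x ++ PySem.Chars.join [] xs := by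
  cases xs <;> simp [PySem.Chars.join, List.intercalate]

theorem pvLit_nil : pvLit [] = [] := rfl

theorem pvLit_cons (c : Char) (cs : List Char) : pvLit (c :: cs) = pvLitChar c ++ pvLit cs := by
  simp [pvLit, pvJoin_nil_cons]

theorem pvTakeGroup_eq_none (cs : List Char) : pvTakeGroup cs = none ↔ ']' ∉ cs := by
  induction cs with
  | nil => simp [pvTakeGroup]
  | cons c rest ih =>
    by_cases hc : c = ']'
    · subst hc; simp [pvTakeGroup]
    · simp [pvTakeGroup, hc, ih, Ne.symm hc]

theorem pvFindMatch_eq_none (cs : List Char) (h : ']' ∉ cs) : pvFindMatch cs = none := by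
  induction cs with
  | nil => rfl
  | cons c rest ih =>
    have hr : ']' ∉ rest := fun hm => h (List.mem_cons_of_mem _ hm)
    have htg : pvTakeGroup rest = none := (pvTakeGroup_eq_none rest).mpr hr
    by_cases hc : c = '[' <;> rw [pvFindMatch] <;> simp [hc, htg, ih hr]

theorem pvSplitGo_of_none (cs : List Char) (h : pvFindMatch cs = none) : pvSplitGo cs = [cs] := by
  rw [pvSplitGo, h]

theorem pvSplitGo_of_some (cs : List Char) (m : List Char × List Char × List Char)
    (h : pvFindMatch cs = some m) : pvSplitGo cs = m.1 :: m.2.1 :: pvSplitGo m.2.2 := by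
  rw [pvSplitGo, h]

-- the shape B's render takes on a leading non-'[' character
theorem pvRender_cons_not_lb (c : Char) (rest : List Char) (hc : c ≠ '[') :
    pvRender (pvSplitGo (c :: rest)) = pvLitChar c ++ pvRender (pvSplitGo rest) := by
  cases hm : pvFindMatch rest with
  | none =>
    have : pvFindMatch (c :: rest) = none := by
      rw [pvFindMatch, if_neg hc, hm]; rfl
    rw [pvSplitGo_of_none _ this, pvSplitGo_of_none _ hm]
    simp [pvRender, pvLit_cons]
  | some m =>
    have : pvFindMatch (c :: rest) = some (c :: m.1, m.2.1, m.2.2) := by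
      rw [pvFindMatch, if_neg hc, hm]; rfl
    rw [pvSplitGo_of_some _ _ this, pvSplitGo_of_some _ _ hm]
    simp [pvRender, pvLit_cons]

theorem pvRender_cons_lb_no_rb (rest : List Char) (h : ']' ∉ rest) :
    pvRender (pvSplitGo ('[' :: rest)) = '[' :: pvRender (pvSplitGo rest) := by
  have hfm : pvFindMatch ('[' :: rest) = none := by
    apply pvFindMatch_eq_none
    intro hmem
    rcases List.mem_cons.mp hmem with h1 | h2
    · exact absurd h1 (by decide)
    · exact h h2
  rw [pvSplitGo_of_none _ hfm, pvSplitGo_of_none _ (pvFindMatch_eq_none rest h)]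
  have hl : pvLitChar '[' = ['['] := by decide
  simp [pvRender, pvLit_cons, hl]

theorem pvTakeGroup_of_decomp (b r : List Char) (hb : ']' ∉ b) :
    pvTakeGroup (b ++ ']' :: r) = some (b, r) := by
  induction b with
  | nil => simp [pvTakeGroup]
  | cons c b' ih =>
    have hc : c ≠ ']' := fun h => hb (h ▸ List.mem_cons_self)
    have hb' : ']' ∉ b' := fun h => hb (List.mem_cons_of_mem _ h)
    simp [pvTakeGroup, hc, ih hb']

theorem pvRender_cons_lb_rb (b r : List Char) (hb : ']' ∉ b) :
    pvRender (pvSplitGo ('[' :: (b ++ ']' :: r))) =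
      ('[' :: (b ++ [']'])) ++ pvRender (pvSplitGo r) := by
  have hfm : pvFindMatch ('[' :: (b ++ ']' :: r)) = some ([], '[' :: (b ++ [']']), r) := by
    rw [pvFindMatch, if_pos rfl, pvTakeGroup_of_decomp b r hb]
  rw [pvSplitGo_of_some _ _ hfm]
  simp [pvRender, pvLit_nil]

-- find's answer for a single-character needle, as a decomposition of the string
theorem pvFind_decomp (rest : List Char) (h : PySem.Chars.find rest [']'] ≠ -1) :
    ∃ (j : Nat) (b r : List Char), PySem.Chars.find rest [']'] = (j : Int) ∧
      rest = b ++ ']' :: r ∧ b.length = j ∧ ']' ∉ b := by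
  have hnn : 0 ≤ PySem.Chars.find rest [']'] :=
    (PySem.Chars.find_nonneg_iff rest [']']).mpr ((PySem.Chars.find_ne_neg_one_iff rest [']']).mp h)
  obtain ⟨hpre, hmin⟩ := PySem.Chars.find_spec hnn
  set j := (PySem.Chars.find rest [']']).toNat with hj
  obtain ⟨t, ht⟩ := hpre
  have hlen : j < rest.length := by
    have h0 : (rest.drop j).length ≠ 0 := by rw [← ht]; simp
    simp at h0; omega
  have hgj : rest[j] = ']' := by
    rw [List.drop_eq_getElem_cons hlen, List.singleton_append] at ht
    exact (List.cons.injEq _ _ _ _ ▸ ht).1.symm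
  refine ⟨j, rest.take j, rest.drop (j + 1), by omega, ?_, by simp [List.length_take]; omega, ?_⟩
  · have hdj : rest.drop j = ']' :: rest.drop (j + 1) := by
      rw [List.drop_eq_getElem_cons hlen, hgj]
    conv_lhs => rw [← List.take_append_drop j rest]
    rw [hdj]
  · intro hmem
    obtain ⟨i, hi, hget⟩ := List.mem_iff_getElem.mp hmem
    have hil : i < j := by simp [List.length_take] at hi; omega
    have hilen : i < rest.length := by simp [List.length_take] at hi; omega
    apply hmin i hil
    rw [List.drop_eq_getElem_cons hilen]
    have hgi : rest[i] = ']' := by rw [List.getElem_take] at hget; exact hget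
    rw [hgi]
    exact ⟨rest.drop (i + 1), by simp⟩

theorem pvTake_succ (b r : List Char) (c : Char) :
    (b ++ c :: r).take (b.length + 1) = b ++ [c] := by
  induction b with
  | nil => simp
  | cons x b ih => simp [ih]

theorem pvDrop_succ (b r : List Char) (c : Char) :
    (b ++ c :: r).drop (b.length + 1) = r := by
  induction b with
  | nil => simp
  | cons x b ih => simp [ih]

-- each non-'[' step of A produces exactly B's literal rendering of that character
theorem pvAGo_piece (ch : Char) :
    (if PySem.Chars.isalpha ch then
      if PySem.Chars.lowerChar ch = PySem.Chars.upperChar ch then [ch]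
      else ('[' :: PySem.Chars.lowerChar ch :: PySem.Chars.upperChar ch :: [']'])
    else [ch]) = pvLitChar ch := by
  unfold pvLitChar
  by_cases ha : PySem.Chars.isalpha ch <;>
    by_cases he : PySem.Chars.lowerChar ch = PySem.Chars.upperChar ch <;>
    simp [ha, he]

-- the heart: A's index loop, joined, equals B's tokenize-and-render of the suffix
theorem pvMain (p : List Char) (i : Nat) :
    PySem.Chars.join [] (pvAGo p i) = pvRender (pvSplitGo (p.drop i)) := by
  by_cases h : i < p.length
  · have hdrop : p.drop i = p[i] :: p.drop (i + 1) := List.drop_eq_getElem_cons h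
    rw [pvAGo, dif_pos h]
    by_cases hlb : p[i] = '['
    · rw [if_pos hlb]
      have hcast : ((i : Int) + 1) = ((i + 1 : Nat) : Int) := by push_cast; ring
      have hff : PySem.Chars.findFrom p [']'] ((i : Int) + 1) =
          if PySem.Chars.find (p.drop (i + 1)) [']'] = -1 then -1
          else ((i + 1 : Nat) : Int) + PySem.Chars.find (p.drop (i + 1)) [']'] := by
        rw [hcast]; exact PySem.Chars.findFrom_natCast p [']'] (i + 1) (by omega)
      by_cases hfind : PySem.Chars.find (p.drop (i + 1)) [']'] = -1
      · have he1 : PySem.Chars.findFrom p [']'] ((i : Int) + 1) = -1 := by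
          rw [hff, if_pos hfind]
        rw [dif_pos he1, pvJoin_nil_cons, pvMain p (i + 1)]
        have hnr : ']' ∉ p.drop (i + 1) := by
          have := (PySem.Chars.find_eq_neg_one_iff _ _).mp hfind
          rw [List.singleton_infix_iff] at this
          exact this
        rw [hdrop, hlb, pvRender_cons_lb_no_rb _ hnr, List.singleton_append]
      · obtain ⟨j, b, r, hfj, hsplit, hblen, hnb⟩ := pvFind_decomp (p.drop (i + 1)) hfind
        have he2 : PySem.Chars.findFrom p [']'] ((i : Int) + 1) = ((i + 1 + j : Nat) : Int) := by
          rw [hff, if_neg hfind, hfj]; push_cast; ring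
        rw [dif_neg (by rw [he2]; omega)]
        have htn : (PySem.Chars.findFrom p [']'] ((i : Int) + 1)).toNat = i + 1 + j := by
          rw [he2]; omega
        have hslice : PySem.List.slice p (some (i : Int))
            (some (PySem.Chars.findFrom p [']'] ((i : Int) + 1) + 1)) =
            '[' :: (b ++ [']']) := by
          have hcast2 : PySem.Chars.findFrom p [']'] ((i : Int) + 1) + 1
              = ((i + j + 2 : Nat) : Int) := by
            rw [he2]; push_cast; ring
          rw [hcast2, PySem.List.slice_natCast]
          have h2 : i + j + 2 - i = j + 2 := by omega
          rw [h2, hdrop, hlb, List.take_succ_cons, hsplit]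
          congr 1
          rw [show j + 1 = b.length + 1 from by omega]
          exact pvTake_succ b r ']'
        rw [pvJoin_nil_cons, hslice, htn, pvMain p (i + 1 + j + 1)]
        have hdd : p.drop (i + 1 + j + 1) = r := by
          rw [show i + 1 + j + 1 = (i + 1) + (j + 1) from by omega, ← List.drop_drop, hsplit,
            show j + 1 = b.length + 1 from by omega]
          exact pvDrop_succ b r ']'
        rw [hdrop, hlb, hsplit, pvRender_cons_lb_rb b r hnb, hdd]
    · rw [if_neg hlb]
      have hstep : PySem.Chars.join [] (pvAGo p (i + 1)) = pvRender (pvSplitGo (p.drop (i + 1))) :=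
        pvMain p (i + 1)
      rw [hdrop, pvRender_cons_not_lb _ _ hlb, ← hstep, ← pvAGo_piece p[i]]
      by_cases ha : PySem.Chars.isalpha p[i] <;>
        by_cases he : PySem.Chars.lowerChar p[i] = PySem.Chars.upperChar p[i] <;>
        simp [ha, he, pvJoin_nil_cons]
  · rw [pvAGo, dif_neg h, List.drop_eq_nil_of_le (by omega),
      pvSplitGo_of_none _ rfl]
    simp [pvRender, pvLit_nil, PySem.Chars.join, List.intercalate]
termination_by p.length - i
decreasing_by all_goals omega

-- the converted pattern agrees between the two ports
theorem pvConverted_eq (s : String) :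
    String.ofList (PySem.Chars.join [] (pvAGo s.toList 0)) =
      String.ofList (pvRender (pvSplitGo s.toList)) := by
  have := pvMain s.toList 0
  rw [List.drop_zero] at this
  rw [this]

-- folding invariant: A's list and B's (list, seen-set) stay in lock step
theorem pvOuter (ps : List String) (accA : List String) (st : List String × PySem.Set String)
    (h1 : accA = st.1) (h2 : ∀ x : String, x ∈ st.2 ↔ x ∈ st.1) :
    ps.foldl (fun expanded pattern =>
      if pattern = "" then expanded
      else
        let converted := String.ofList (PySem.Chars.join [] (pvAGo pattern.toList 0))
        if converted ∈ expanded then expanded else expanded ++ [converted]) accA =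
    (ps.foldl (fun (st : List String × PySem.Set String) pattern =>
      if pattern = "" then st
      else
        let converted := String.ofList (pvRender (pvSplitGo pattern.toList))
        if PySem.Set.contains st.2 converted then st
        else (st.1 ++ [converted], PySem.Set.add st.2 converted)) st).1 := by
  induction ps generalizing accA st with
  | nil => simpa using h1
  | cons s ps ih =>
    simp only [List.foldl_cons]
    by_cases hs : s = ""
    · rw [if_pos hs, if_pos hs]; exact ih accA st h1 h2
    · rw [if_neg hs, if_neg hs]
      rw [pvConverted_eq s]
      set c := String.ofList (pvRender (pvSplitGo s.toList)) with hc
      have hcontains : PySem.Set.contains st.2 c = true ↔ c ∈ st.1 := by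
        rw [← h2 c]
        simp [PySem.Set.contains]
      by_cases hmem : c ∈ accA
      · rw [if_pos hmem]
        have : PySem.Set.contains st.2 c = true := hcontains.mpr (h1 ▸ hmem)
        rw [if_pos this]
        exact ih accA st h1 h2
      · rw [if_neg hmem]
        have hnc : ¬ PySem.Set.contains st.2 c = true := fun hcon =>
          hmem (h1 ▸ hcontains.mp hcon)
        rw [if_neg hnc]
        apply ih
        · simp [h1]
        · intro x
          simp only [PySem.Set.add]
          have : PySem.Set.contains st.2 c = false := by
            cases hb : PySem.Set.contains st.2 c
            · rfl
            · exact absurd hb hnc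
          rw [this]
          simp only [if_neg (by simp : ¬ (false = true))]
          constructor
          · intro hx
            rcases List.mem_append.mp hx with hx1 | hx2
            · exact List.mem_append.mpr (Or.inl ((h2 x).mp hx1))
            · exact List.mem_append.mpr (Or.inr hx2)
          · intro hx
            rcases List.mem_append.mp hx with hx1 | hx2
            · exact List.mem_append.mpr (Or.inl ((h2 x).mpr hx1))
            · exact List.mem_append.mpr (Or.inr hx2)

-- ===== VERDICT (by name: the statement is the Claim_ definition above) =====
theorem expand_case_insensitive_patterns_py_spec : Claim_equal_expand_case_insensitive_patterns_py := by
  intro patterns _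
  unfold Spec_expand_case_insensitive_patterns_py
  unfold expand_case_insensitive_patterns_py expand_case_insensitive_patterns_py_alt
  exact pvOuter patterns [] ([], PySem.Set.empty) rfl (by intro x; simp [PySem.Set.empty])
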